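-- pv_equiv track=rewrite | github.com/semeneleven/XTest | codes/others/bdc.py | bdc
-- ===== SOURCE A (Python) =====
-- def bdc(N, base):
--     if base == [8, 4, 2, 1]:
--
--         bdc = int()
--         for i in str(N):
--             bdc *= 16
--             bdc += int(i)
--
--         return str(bin(bdc))[2:]
--
--     else:
--
--         bdc = str()
--
--         for i in str(N):
--
--             four = [0, 0, 0, 0]
--             current_number = int(i)
--
--             for j in range(len(base)):
--                 if current_number >= base[j]:
--                     current_number -= base[j]
--                     four[j] = 1
--
--             for j in four:
--                 bdc += str(j)
--
--         return bdc
-- ===== SOURCE B (Python) =====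
-- def bdc(N, base):
--     # One uniform greedy encoder for every base: each digit of N becomes a
--     # 4-character BCD group (greedy bits over `base`, right-padded with '0');
--     # the [8,4,2,1] case just strips leading zeros like bin() does.
--     groups = []
--     for c in str(N):
--         n = int(c)
--         bits = []
--         for b in base:
--             if n >= b:
--                 n -= b
--                 bits.append('1')
--             else:
--                 bits.append('0')
--         groups.append(''.join(bits).ljust(4, '0'))
--     s = ''.join(groups)
--     if base == [8, 4, 2, 1]:
--         return s.lstrip('0') or '0'
--     return s
-- ===== Notes on version B (the rewrite author's own statement) =====
-- stated objective: simpler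
-- what changed: A's special-cased hex-packing-plus-bin() arithmetic for base [8,4,2,1] and its mutable four-slot indexed buffer for other bases are replaced by one uniform greedy bit encoder (per digit: append '1'/'0' and subtract over base, pad the group to 4 chars), with a single leading-zero strip reproducing bin() in the [8,4,2,1] case.
-- outside the precondition, e.g. on bdc(2, [-1, 0, 2, 17, 17]): A returns '1110', B returns '11100'; on bdc(5, [16, 8, 4, 2, 1]): A raises IndexError, B returns '00101'
import Mathlib
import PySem

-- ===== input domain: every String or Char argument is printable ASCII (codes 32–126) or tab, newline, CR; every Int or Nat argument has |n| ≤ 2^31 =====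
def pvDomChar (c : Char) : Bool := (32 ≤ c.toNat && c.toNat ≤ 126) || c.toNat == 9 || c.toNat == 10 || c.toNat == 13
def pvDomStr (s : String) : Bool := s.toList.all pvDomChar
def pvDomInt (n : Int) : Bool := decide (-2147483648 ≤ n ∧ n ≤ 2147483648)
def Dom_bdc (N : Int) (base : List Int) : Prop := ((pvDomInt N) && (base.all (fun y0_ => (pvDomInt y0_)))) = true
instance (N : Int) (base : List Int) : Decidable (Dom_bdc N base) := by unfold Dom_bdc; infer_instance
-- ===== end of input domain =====

-- B replaces A's hex-packing-plus-bin special case by one uniform greedy encoder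
-- (4-char BCD group per digit, leading zeros stripped in the [8,4,2,1] case): simpler, one code path.

-- ===== PORT A =====
-- four[j] = 1 (Python list assignment); inside Pre_ the index is always in range
-- (out-of-range would be IndexError in Python, excluded by Pre_).
def pyListSet (xs : List Int) (j : Int) (v : Int) : List Int :=
  if 0 ≤ j then xs.set j.toNat v else xs

-- the inner 'for j in range(len(base))' loop of A: state (current_number, four)
def bdcFour (cn : Int) (base : List Int) : Int × List Int :=
  (PySem.List.pyRange 0 base.length 1).foldl
    (fun p j =>
      if p.1 ≥ (PySem.List.pyGet? base j).getD 0 then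
        (p.1 - (PySem.List.pyGet? base j).getD 0, pyListSet p.2 j 1)
      else p)
    (cn, [0, 0, 0, 0])

-- int(i) raises ValueError when i is not a digit (N < 0); excluded by Pre_, .getD 0 there.
-- str/bin handled on List Char (Lean's own String append is kernel-opaque).
def bdc (N : Int) (base : List Int) : String :=
  if base = [8, 4, 2, 1] then
    let v := (PySem.Int.toChars N).foldl
      (fun acc c => acc * 16 + (PySem.Int.ofChars? [c]).getD 0) 0
    String.ofList (PySem.List.slice (PySem.Int.toBinChars0b v) (some 2) none)
  else
    String.ofList ((PySem.Int.toChars N).foldl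
      (fun acc c =>
        (bdcFour ((PySem.Int.ofChars? [c]).getD 0) base).2.foldl
          (fun a j => a ++ PySem.Int.toChars j) acc)
      [])

-- ===== PORT B =====
-- greedy bit string of one digit value n over base
def bdcGroup (n : Int) (base : List Int) : List Char :=
  (base.foldl
    (fun (p : Int × List Char) b =>
      if p.1 ≥ b then (p.1 - b, p.2 ++ ['1']) else (p.1, p.2 ++ ['0']))
    (n, [])).2

-- ''.join(bits).ljust(4, '0')
def ljust4 (cs : List Char) : List Char := cs ++ List.replicate (4 - cs.length) '0'

def bdc_alt (N : Int) (base : List Int) : String :=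
  let s := (PySem.Int.toChars N).flatMap
    (fun c => ljust4 (bdcGroup ((PySem.Int.ofChars? [c]).getD 0) base))
  if base = [8, 4, 2, 1] then
    -- s.lstrip('0') or '0'  (lstrip with an explicit char set {'0'}, exact)
    let t := s.dropWhile (· == '0')
    String.ofList (if t.isEmpty then ['0'] else t)
  else
    String.ofList s

-- ===== PRECONDITION & SPEC =====
-- Pre_ excludes N < 0, where int('-') raises ValueError, and bases longer than 4, on which
-- A's hard-coded four-slot buffer raises IndexError as soon as a fifth bit fires and otherwise
-- returns a string silently truncated to 4 bits per digit (an artefact of the buffer size,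
-- dropping the tail of base); B naturally encodes over the whole base there.
def Pre_bdc (N : Int) (base : List Int) : Prop := 0 ≤ N ∧ base.length ≤ 4
instance (N : Int) (base : List Int) : Decidable (Pre_bdc N base) := by unfold Pre_bdc; infer_instance

def pvWitness_bdc : Int × List Int := (903, [8, 4, 2, 1])

def Spec_bdc (N : Int) (base : List Int) (out : String) : Prop := out = bdc_alt N base
instance (N : Int) (base : List Int) (out : String) : Decidable (Spec_bdc N base out) := by unfold Spec_bdc; infer_instance

-- ===== CLAIM (what is proved, stated in full; the proofs are below) =====
def Claim_equal_bdc : Prop := ∀ (N : Int) (base : List Int), Dom_bdc N base → Pre_bdc N base → Spec_bdc N base (bdc N base)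

-- ===== LEMMAS AND PROOFS =====

-- digit value of a single char, as both ports compute it
def dvc (c : Char) : Int := (PySem.Int.ofChars? [c]).getD 0

-- B's group for the [8,4,2,1] base
def g1 (c : Char) : List Char := ljust4 (bdcGroup (dvc c) [8, 4, 2, 1])

lemma bdc_digit_mem (c : Char) (h : c.isDigit = true) :
    c = '0' ∨ c = '1' ∨ c = '2' ∨ c = '3' ∨ c = '4' ∨ c = '5' ∨ c = '6' ∨ c = '7' ∨
      c = '8' ∨ c = '9' := by
  have h1 : 48 ≤ c.toNat ∧ c.toNat ≤ 57 := by
    simp [Char.isDigit, UInt32.le_iff_toNat_le] at h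
    exact ⟨h.1, h.2⟩
  have hc : ∀ d : Char, c.toNat = d.toNat → c = d := fun d hd =>
    Char.ext (UInt32.toNat_inj.mp hd)
  obtain ⟨hl, hr⟩ := h1
  interval_cases hn : c.toNat
  · simp [hc '0' (by decide)]
  · simp [hc '1' (by decide)]
  · simp [hc '2' (by decide)]
  · simp [hc '3' (by decide)]
  · simp [hc '4' (by decide)]
  · simp [hc '5' (by decide)]
  · simp [hc '6' (by decide)]
  · simp [hc '7' (by decide)]
  · simp [hc '8' (by decide)]
  · simp [hc '9' (by decide)]

lemma bdc_toChars_digits (N : Int) (hN : 0 ≤ N) :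
    ∀ c ∈ PySem.Int.toChars N, c.isDigit = true := by
  intro c hc
  unfold PySem.Int.toChars at hc
  rw [if_neg (by omega)] at hc
  exact Nat.isDigit_of_mem_toDigits (by norm_num) (by norm_num) hc

lemma toDigits2_step (m : Nat) (h : 2 ≤ m) :
    Nat.toDigits 2 m = Nat.toDigits 2 (m / 2) ++ [(m % 2).digitChar] :=
  Nat.toDigits_of_base_le (by norm_num) h

lemma pack16 (n k : Nat) (hn : 0 < n) (hk : k < 16) :
    Nat.toDigits 2 (16 * n + k) =
      Nat.toDigits 2 n ++
        [(k / 8 % 2).digitChar, (k / 4 % 2).digitChar, (k / 2 % 2).digitChar, (k % 2).digitChar] := by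
  rw [toDigits2_step (16 * n + k) (by omega)]
  have e1 : (16 * n + k) / 2 = 8 * n + k / 2 := by omega
  have e1' : (16 * n + k) % 2 = k % 2 := by omega
  rw [e1, e1', toDigits2_step (8 * n + k / 2) (by omega)]
  have e2 : (8 * n + k / 2) / 2 = 4 * n + k / 4 := by omega
  have e2' : (8 * n + k / 2) % 2 = k / 2 % 2 := by omega
  rw [e2, e2', toDigits2_step (4 * n + k / 4) (by omega)]
  have e3 : (4 * n + k / 4) / 2 = 2 * n + k / 8 := by omega
  have e3' : (4 * n + k / 4) % 2 = k / 4 % 2 := by omega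
  rw [e3, e3', toDigits2_step (2 * n + k / 8) (by omega)]
  have e4 : (2 * n + k / 8) / 2 = n := by omega
  have e4' : (2 * n + k / 8) % 2 = k / 8 % 2 := by omega
  rw [e4, e4']
  simp

lemma bdc_bits_lt16 (k : Nat) (h1 : 0 < k) (h2 : k < 16) :
    Nat.toDigits 2 k =
      List.dropWhile (· == '0')
        [(k / 8 % 2).digitChar, (k / 4 % 2).digitChar, (k / 2 % 2).digitChar, (k % 2).digitChar] := by
  interval_cases k <;> decide

-- one induction step of the [8,4,2,1] invariant, generic in the digit value k
lemma bdc_key_step (L : List Char) (c : Char) (V : Int) (hV0 : 0 ≤ V)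
    (h0 : V = 0 → L.flatMap g1 = List.replicate (4 * L.length) '0')
    (hp : 0 < V → Nat.toDigits 2 V.toNat = (L.flatMap g1).dropWhile (· == '0'))
    (k : Nat) (hk : k < 16) (hdv : dvc c = (k : Int))
    (hg : g1 c = [(k / 8 % 2).digitChar, (k / 4 % 2).digitChar, (k / 2 % 2).digitChar, (k % 2).digitChar]) :
    0 ≤ V * 16 + dvc c ∧
      (V * 16 + dvc c = 0 → (L ++ [c]).flatMap g1 = List.replicate (4 * (L ++ [c]).length) '0') ∧
      (0 < V * 16 + dvc c →
        Nat.toDigits 2 (V * 16 + dvc c).toNat = ((L ++ [c]).flatMap g1).dropWhile (· == '0')) := by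
  rw [hdv]
  have hflat : (L ++ [c]).flatMap g1 = L.flatMap g1 ++ g1 c := by simp
  refine ⟨by positivity, ?_, ?_⟩
  · intro hz
    have hVz : V = 0 ∧ k = 0 := by
      constructor <;> omega
    obtain ⟨hVz, hkz⟩ := hVz
    subst hkz
    rw [hflat, h0 hVz, hg]
    have : (4 : ℕ) * (L ++ [c]).length = 4 * L.length + 4 := by simp; omega
    rw [this, List.replicate_add]
    rfl
  · intro hpos
    rw [hflat, hg]
    by_cases hV : V = 0
    · subst hV
      have hk0 : 0 < k := by omega
      have hvn : ((0 : Int) * 16 + (k : Int)).toNat = k := by omega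
      rw [hvn, List.dropWhile_append]
      have hrep : (L.flatMap g1).dropWhile (· == '0') = [] := by
        rw [h0 rfl, List.dropWhile_eq_nil_iff]
        intro a ha
        simp [List.mem_replicate] at ha
        simp [ha]
      rw [hrep]
      simp only [List.isEmpty_nil, if_true]
      exact bdc_bits_lt16 k hk0 hk
    · have hVpos : 0 < V := lt_of_le_of_ne hV0 (Ne.symm hV)
      have hvn : (V * 16 + (k : Int)).toNat = 16 * V.toNat + k := by omega
      rw [hvn, pack16 V.toNat k (by omega) hk, hp hVpos, List.dropWhile_append]
      have hne : ((L.flatMap g1).dropWhile (· == '0')).isEmpty = false := by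
        rw [← hp hVpos]
        have := @Nat.length_toDigits_pos 2 V.toNat
        cases hfoo : Nat.toDigits 2 V.toNat with
        | nil => rw [hfoo] at this; simp at this
        | cons x xs => simp
      rw [hne]
      simp

-- the [8,4,2,1] invariant over the whole digit string
lemma bdc_key (L : List Char) (h : ∀ c ∈ L, c.isDigit = true) :
    0 ≤ L.foldl (fun a c => a * 16 + dvc c) 0 ∧
      (L.foldl (fun a c => a * 16 + dvc c) 0 = 0 →
        L.flatMap g1 = List.replicate (4 * L.length) '0') ∧
      (0 < L.foldl (fun a c => a * 16 + dvc c) 0 →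
        Nat.toDigits 2 (L.foldl (fun a c => a * 16 + dvc c) 0).toNat =
          (L.flatMap g1).dropWhile (· == '0')) := by
  induction L using List.reverseRecOn with
  | nil => refine ⟨le_refl _, fun _ => rfl, fun h => by simp at h⟩
  | append_singleton L c ih =>
    have hL : ∀ x ∈ L, x.isDigit = true := fun x hx => h x (by simp [hx])
    have hc : c.isDigit = true := h c (by simp)
    obtain ⟨hV0, h0, hp⟩ := ih hL
    rw [List.foldl_append]
    simp only [List.foldl_cons, List.foldl_nil]
    rcases bdc_digit_mem c hc with rfl | rfl | rfl | rfl | rfl | rfl | rfl | rfl | rfl | rfl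
    · exact bdc_key_step L _ _ hV0 h0 hp 0 (by norm_num) (by decide) (by decide)
    · exact bdc_key_step L _ _ hV0 h0 hp 1 (by norm_num) (by decide) (by decide)
    · exact bdc_key_step L _ _ hV0 h0 hp 2 (by norm_num) (by decide) (by decide)
    · exact bdc_key_step L _ _ hV0 h0 hp 3 (by norm_num) (by decide) (by decide)
    · exact bdc_key_step L _ _ hV0 h0 hp 4 (by norm_num) (by decide) (by decide)
    · exact bdc_key_step L _ _ hV0 h0 hp 5 (by norm_num) (by decide) (by decide)
    · exact bdc_key_step L _ _ hV0 h0 hp 6 (by norm_num) (by decide) (by decide)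
    · exact bdc_key_step L _ _ hV0 h0 hp 7 (by norm_num) (by decide) (by decide)
    · exact bdc_key_step L _ _ hV0 h0 hp 8 (by norm_num) (by decide) (by decide)
    · exact bdc_key_step L _ _ hV0 h0 hp 9 (by norm_num) (by decide) (by decide)

-- the per-digit group of A's four-slot loop equals B's padded greedy group (base.length ≤ 4)
lemma bdc_four_eq (n : Int) (base : List Int) (hlen : base.length ≤ 4) :
    (bdcFour n base).2.flatMap PySem.Int.toChars = ljust4 (bdcGroup n base) := by
  have r0 : PySem.List.pyRange 0 (0 : Int) 1 = [] := by decide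
  have r1 : PySem.List.pyRange 0 (1 : Int) 1 = [0] := by decide
  have r2 : PySem.List.pyRange 0 (2 : Int) 1 = [0, 1] := by decide
  have r3 : PySem.List.pyRange 0 (3 : Int) 1 = [0, 1, 2] := by decide
  have r4 : PySem.List.pyRange 0 (4 : Int) 1 = [0, 1, 2, 3] := by decide
  rcases base with _ | ⟨a, _ | ⟨b, _ | ⟨c, _ | ⟨d, _ | ⟨e, t⟩⟩⟩⟩⟩
  · norm_num [bdcFour, bdcGroup, ljust4, r0]
    decide
  · norm_num [bdcFour, bdcGroup, ljust4, r1]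
    simp [pyListSet]
    split_ifs <;> simp_all <;> rfl
  · norm_num [bdcFour, bdcGroup, ljust4, r2]
    simp [pyListSet]
    split_ifs <;> simp_all <;> rfl
  · norm_num [bdcFour, bdcGroup, ljust4, r3]
    simp [pyListSet]
    split_ifs <;> simp_all <;> rfl
  · norm_num [bdcFour, bdcGroup, ljust4, r4]
    simp [pyListSet]
    split_ifs <;> simp_all <;> rfl
  · simp only [List.length_cons] at hlen
    omega

lemma bdc_slice2 (xs : List Char) : PySem.List.slice xs (some 2) none = xs.drop 2 := by
  have h := PySem.List.slice_from (a := (2 : Int)) (xs := xs) (by norm_num)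
  rw [h]; rfl

-- ===== VERDICT (by name: the statement is the Claim_ definition above) =====
theorem bdc_spec : Claim_equal_bdc := by
  intro N base hdom hpre
  obtain ⟨hN, hlen⟩ := hpre
  unfold Spec_bdc bdc bdc_alt
  by_cases hb : base = [8, 4, 2, 1]
  · subst hb
    simp only [if_pos]
    have hdv : (fun (acc : Int) (c : Char) => acc * 16 + (PySem.Int.ofChars? [c]).getD 0) =
        (fun a c => a * 16 + dvc c) := rfl
    have hg : (fun (c : Char) => ljust4 (bdcGroup ((PySem.Int.ofChars? [c]).getD 0) [8, 4, 2, 1])) = g1 := rfl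
    rw [hdv, hg]
    obtain ⟨hV0, h0, hp⟩ := bdc_key (PySem.Int.toChars N) (bdc_toChars_digits N hN)
    set V := (PySem.Int.toChars N).foldl (fun a c => a * 16 + dvc c) 0 with hV
    have hbin : PySem.Int.toBinChars0b V = '0' :: 'b' :: Nat.toDigits 2 V.toNat := by
      unfold PySem.Int.toBinChars0b
      rw [if_neg (by omega)]
    rw [hbin, bdc_slice2]
    simp only [List.drop_succ_cons, List.drop_zero]
    rcases eq_or_lt_of_le hV0 with hz | hpos
    · rw [← hz]
      have hrep := h0 hz.symm
      rw [hrep]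
      have : List.dropWhile (· == '0') (List.replicate (4 * (PySem.Int.toChars N).length) '0') = [] := by
        rw [List.dropWhile_eq_nil_iff]
        intro a ha
        simp [List.mem_replicate] at ha
        simp [ha]
      rw [this]
      rfl
    · rw [hp hpos]
      have hne : ((PySem.Int.toChars N).flatMap g1).dropWhile (· == '0') ≠ [] := by
        rw [← hp hpos]
        have := @Nat.length_toDigits_pos 2 V.toNat
        intro hcon
        rw [hcon] at this
        simp at this
      simp [List.isEmpty_iff, hne]
  · simp only [if_neg hb]
    have hfun : ∀ (acc : List Char) (c : Char),
        (bdcFour ((PySem.Int.ofChars? [c]).getD 0) base).2.foldl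
            (fun a j => a ++ PySem.Int.toChars j) acc =
          acc ++ ljust4 (bdcGroup ((PySem.Int.ofChars? [c]).getD 0) base) := by
      intro acc c
      rw [PySem.List.foldl_append_eq_flatMap, bdc_four_eq _ _ hlen]
    simp only [hfun]
    rw [PySem.List.foldl_append_eq_flatMap]
    simp
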